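-- pv_equiv track=rewrite | github.com/AdamZhouSE/pythonHomework | Code/CodeRecords/2885/60739/271868.py | getNum
-- ===== SOURCE A (Python) =====
-- def getNum(l):
--     n = 0
--     tmp_list = [0, 0, 0]
--     for i in range (len(l)):
--         if l[i] % 3 == 0:
--             tmp_list[0] += 1
--         elif l[i] % 3 == 1:
--             tmp_list[1] += 1
--         else:
--             tmp_list[2] += 1
--     n = tmp_list[0] + min(tmp_list[1], tmp_list[2]) + abs(tmp_list[1] - tmp_list[2]) // 3
--
--     return n
-- ===== SOURCE B (Python) =====
-- def getNum(l):
--     # Sort the nonzero residues, then greedily pair a 1 (front) with a 2 (back)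
--     # via two pointers; leftover same-residue items are grouped in threes.
--     zeros = 0
--     rest = []
--     for x in l:
--         r = x % 3
--         if r == 0:
--             zeros += 1
--         else:
--             rest.append(r)
--     rest.sort()
--     n = zeros
--     i, j = 0, len(rest) - 1
--     while i < j and rest[i] == 1 and rest[j] == 2:
--         n += 1
--         i += 1
--         j -= 1
--     n += (j - i + 1) // 3
--     return n
-- ===== Notes on version B (the rewrite author's own statement) =====
-- stated objective: alternative
-- what changed: Replaces A's count-three-residues-then-closed-formula by a different algorithm: collect the nonzero residues, sort them, greedily pair a 1 (front pointer) with a 2 (back pointer) in a two-pointer while loop, then group the leftover equal residues in threes.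
import Mathlib
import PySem

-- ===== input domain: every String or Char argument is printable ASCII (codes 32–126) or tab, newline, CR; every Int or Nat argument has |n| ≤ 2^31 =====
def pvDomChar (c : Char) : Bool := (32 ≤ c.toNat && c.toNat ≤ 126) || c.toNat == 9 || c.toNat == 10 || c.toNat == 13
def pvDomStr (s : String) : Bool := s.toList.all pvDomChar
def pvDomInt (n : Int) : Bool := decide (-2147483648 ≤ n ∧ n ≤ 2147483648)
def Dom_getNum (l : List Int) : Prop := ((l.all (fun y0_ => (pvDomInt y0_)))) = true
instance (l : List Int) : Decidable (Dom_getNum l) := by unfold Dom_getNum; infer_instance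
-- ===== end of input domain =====

-- ===== PORT A =====
-- B replaces A's residue-count-plus-formula by a different algorithm: sort the nonzero
-- residues, greedily pair a 1 with a 2 by two pointers, then group leftovers in threes.
def getNumStep (t : Int × Int × Int) (x : Int) : Int × Int × Int :=
  if PySem.Int.mod x 3 = 0 then (t.1 + 1, t.2.1, t.2.2)
  else if PySem.Int.mod x 3 = 1 then (t.1, t.2.1 + 1, t.2.2)
  else (t.1, t.2.1, t.2.2 + 1)

def getNum (l : List Int) : Int :=
  let t := (PySem.List.pyRange 0 l.length 1).foldl
    (fun t i => getNumStep t (PySem.List.pyGetD l i 0)) (0, 0, 0)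
  t.1 + min t.2.1 t.2.2 + PySem.Int.floordiv |t.2.1 - t.2.2| 3

-- ===== PORT B =====
-- the while loop of Source B: two pointers i (front) and j (back) over the sorted residues
def pairLoop (rest : List Int) (i j n : Int) : Int :=
  if h : i < j ∧ PySem.List.pyGetD rest i 0 = 1 ∧ PySem.List.pyGetD rest j 0 = 2 then
    pairLoop rest (i + 1) (j - 1) (n + 1)
  else n + PySem.Int.floordiv (j - i + 1) 3
termination_by (j - i).toNat
decreasing_by omega

def getNum_alt (l : List Int) : Int :=
  let p := l.foldl (fun (acc : Int × List Int) x =>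
      let r := PySem.Int.mod x 3
      if r = 0 then (acc.1 + 1, acc.2) else (acc.1, acc.2 ++ [r])) (0, [])
  let rest := PySem.List.sorted p.2 (fun x => x) false
  pairLoop rest 0 ((rest.length : Int) - 1) p.1

-- ===== PRECONDITION & SPEC =====
def Spec_getNum (l : List Int) (out : Int) : Prop := out = getNum_alt l
instance (l : List Int) (out : Int) : Decidable (Spec_getNum l out) := by unfold Spec_getNum; infer_instance

-- ===== CLAIM (what is proved, stated in full; the proofs are below) =====
def Claim_equal_getNum : Prop := ∀ (l : List Int), Dom_getNum l → Spec_getNum l (getNum l)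

-- ===== LEMMAS AND PROOFS =====

-- every Python residue x % 3 is 0, 1 or 2
theorem mod3_cases (x : Int) : PySem.Int.mod x 3 = 0 ∨ PySem.Int.mod x 3 = 1 ∨ PySem.Int.mod x 3 = 2 := by
  have h1 := PySem.Int.mod_nonneg x (b := 3) (by norm_num)
  have h2 := PySem.Int.mod_lt x (b := 3) (by norm_num)
  omega

-- A's fold computes the three residue counts
theorem getNum_fold_counts (l : List Int) (t : Int × Int × Int) :
    l.foldl getNumStep t =
      (t.1 + (l.countP (fun x => PySem.Int.mod x 3 == 0) : Nat),
       t.2.1 + (l.countP (fun x => PySem.Int.mod x 3 == 1) : Nat),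
       t.2.2 + (l.countP (fun x => PySem.Int.mod x 3 == 2) : Nat)) := by
  induction l generalizing t with
  | nil => simp
  | cons x xs ih =>
    simp only [List.foldl_cons, ih, List.countP_cons, getNumStep]
    rcases mod3_cases x with h | h | h <;>
      simp only [h] <;> norm_num [Prod.ext_iff] <;> ring

-- the nonzero residues of l, in order
def resList (l : List Int) : List Int :=
  l.filterMap (fun x => let r := PySem.Int.mod x 3; if r = 0 then none else some r)

-- B's fold computes (count of residue 0, resList l)
theorem altFold_eq (l : List Int) (z : Int) (acc : List Int) :
    l.foldl (fun (acc : Int × List Int) x =>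
      let r := PySem.Int.mod x 3
      if r = 0 then (acc.1 + 1, acc.2) else (acc.1, acc.2 ++ [r])) (z, acc) =
    (z + (l.countP (fun x => PySem.Int.mod x 3 == 0) : Nat), acc ++ resList l) := by
  induction l generalizing z acc with
  | nil => simp [resList]
  | cons x xs ih =>
    by_cases h : PySem.Int.mod x 3 = 0
    · simp only [List.foldl_cons, h, ih, resList, List.filterMap_cons,
        List.countP_cons, beq_self_eq_true, if_true, Prod.ext_iff]
      exact ⟨by push_cast; ring, trivial⟩
    · have hb : (PySem.Int.mod x 3 == 0) = false := by simpa using h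
      simp only [List.foldl_cons, if_neg h, ih, resList, List.filterMap_cons,
        List.countP_cons, hb, Bool.false_eq_true, if_false, Prod.ext_iff]
      exact ⟨by push_cast; ring, by simp⟩

theorem resList_cons (x : Int) (xs : List Int) :
    resList (x :: xs) =
      (if PySem.Int.mod x 3 = 0 then [] else [PySem.Int.mod x 3]) ++ resList xs := by
  simp only [resList, List.filterMap_cons]
  by_cases h : PySem.Int.mod x 3 = 0
  · simp only [h, reduceIte, List.nil_append]
  · simp only [if_neg h, List.cons_append, List.nil_append]

theorem mem_resList (l : List Int) (y : Int) (hy : y ∈ resList l) : y = 1 ∨ y = 2 := by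
  simp only [resList, List.mem_filterMap] at hy
  obtain ⟨x, -, hx⟩ := hy
  have hx' : (if PySem.Int.mod x 3 = 0 then (none : Option Int)
      else some (PySem.Int.mod x 3)) = some y := hx
  rcases mod3_cases x with h | h | h <;> rw [h] at hx'
  · simp at hx'
  · norm_num at hx'; omega
  · norm_num at hx'; omega

theorem count_resList_one (l : List Int) :
    (resList l).count 1 = l.countP (fun x => PySem.Int.mod x 3 == 1) := by
  induction l with
  | nil => rfl
  | cons x xs ih =>
    rw [resList_cons, List.count_append, List.countP_cons, ih]
    rcases mod3_cases x with h | h | h <;>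
      simp only [h, reduceIte, List.count_nil] <;> norm_num [Nat.add_comm]

theorem count_resList_two (l : List Int) :
    (resList l).count 2 = l.countP (fun x => PySem.Int.mod x 3 == 2) := by
  induction l with
  | nil => rfl
  | cons x xs ih =>
    rw [resList_cons, List.count_append, List.countP_cons, ih]
    rcases mod3_cases x with h | h | h <;>
      simp only [h, reduceIte, List.count_nil] <;> norm_num [Nat.add_comm]

-- sorting the residues gives replicate c1 1 ++ replicate c2 2
theorem sorted_resList (l : List Int) :
    PySem.List.sorted (resList l) (fun x => x) false =
      List.replicate ((resList l).count 1) 1 ++ List.replicate ((resList l).count 2) 2 := by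
  apply PySem.List.sorted_id_eq_of_perm_of_pairwise
  · rw [List.perm_iff_count]
    intro a
    by_cases h1 : a = 1
    · simp [h1, List.count_append, List.count_replicate]
    by_cases h2 : a = 2
    · simp [h2, List.count_append, List.count_replicate]
    · rw [List.count_eq_zero.2, List.count_eq_zero.2]
      · intro ha; rcases mem_resList l a ha with h | h <;> simp_all
      · intro ha
        rcases List.mem_append.1 ha with h | h <;>
          exact absurd (List.eq_of_mem_replicate h) (by assumption)
  · rw [List.pairwise_append]
    refine ⟨List.pairwise_replicate.2 (by simp), List.pairwise_replicate.2 (by simp), ?_⟩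
    intro a ha b hb
    rw [List.eq_of_mem_replicate ha, List.eq_of_mem_replicate hb]; norm_num

-- the two-pointer loop on replicate a 1 ++ replicate b 2, counting down to the meeting point
theorem pairLoop_spec_aux (a b m : Nat) : ∀ (k : Nat), k ≤ min a b → min a b - k = m → ∀ n : Int,
    pairLoop (List.replicate a 1 ++ List.replicate b 2) k ((a : Int) + b - 1 - k) n =
      n + ((min a b : Nat) : Int) - k + PySem.Int.floordiv ((a : Int) + b - 2 * min a b) 3 := by
  have hslen : (List.replicate a (1 : Int) ++ List.replicate b 2).length = a + b := by simp
  induction m with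
  | zero =>
    intro k hk hm n
    rw [pairLoop, dif_neg]
    · have hk' : k = min a b := by omega
      subst hk'
      have harg : (a : Int) + b - 1 - (min a b : Nat) - (min a b : Nat) + 1
          = (a : Int) + b - 2 * min a b := by ring
      rw [harg]; push_cast; ring
    · rintro ⟨hij, h1, h2⟩
      have hk' : k = min a b := by omega
      rcases Nat.le_total a b with hab | hab
      · -- k = a, so the front pointer reads a 2, not a 1
        have hka : k = a := by omega
        have hrange : (k : Int) < (List.replicate a (1 : Int) ++ List.replicate b 2).length := by
          rw [hslen]; push_cast; omega
        rw [PySem.List.pyGetD_eq_getElem _ _ (by omega) hrange] at h1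
        rw [List.getElem_append_right (by simp; omega)] at h1
        rw [List.getElem_replicate] at h1
        omega
      · -- k = b, so the back pointer reads a 1, not a 2
        have hkb : k = b := by omega
        have hj0 : (0 : Int) ≤ (a : Int) + b - 1 - k := by omega
        have hrange : (a : Int) + b - 1 - k
            < (List.replicate a (1 : Int) ++ List.replicate b 2).length := by
          rw [hslen]; push_cast; omega
        rw [PySem.List.pyGetD_eq_getElem _ _ hj0 hrange] at h2
        rw [List.getElem_append_left (by simp; omega)] at h2
        rw [List.getElem_replicate] at h2
        omega
  | succ m ih =>
    intro k hk hm n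
    rw [pairLoop, dif_pos]
    · have := ih (k + 1) (by omega) (by omega) (n + 1)
      have harg : (a : Int) + b - 1 - k - 1 = (a : Int) + b - 1 - ((k : Int) + 1) := by ring
      push_cast at this ⊢
      rw [harg, this]; ring
    · refine ⟨by omega, ?_, ?_⟩
      · have hrange : (k : Int) < (List.replicate a (1 : Int) ++ List.replicate b 2).length := by
          rw [hslen]; push_cast; omega
        rw [PySem.List.pyGetD_eq_getElem _ _ (by omega) hrange]
        rw [List.getElem_append_left (by simp; omega)]
        exact List.getElem_replicate _
      · have hj0 : (0 : Int) ≤ (a : Int) + b - 1 - k := by omega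
        have hrange : (a : Int) + b - 1 - k
            < (List.replicate a (1 : Int) ++ List.replicate b 2).length := by
          rw [hslen]; push_cast; omega
        rw [PySem.List.pyGetD_eq_getElem _ _ hj0 hrange]
        rw [List.getElem_append_right (by simp; omega)]
        exact List.getElem_replicate _

theorem pairLoop_spec (a b : Nat) (n : Int) :
    pairLoop (List.replicate a 1 ++ List.replicate b 2) 0 ((a : Int) + b - 1) n =
      n + ((min a b : Nat) : Int) + PySem.Int.floordiv ((a : Int) + b - 2 * min a b) 3 := by
  have := pairLoop_spec_aux a b (min a b) 0 (by omega) (by omega) n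
  simpa using this

-- ===== VERDICT (by name: the statement is the Claim_ definition above) =====
theorem getNum_spec : Claim_equal_getNum := by
  intro l _
  unfold Spec_getNum getNum getNum_alt
  rw [PySem.List.foldl_pyRange_zero_pyGetD' l 0 getNumStep (0, 0, 0)]
  rw [getNum_fold_counts, altFold_eq]
  simp only [List.nil_append]
  rw [sorted_resList]
  set c0 : Int := ((l.countP (fun x => PySem.Int.mod x 3 == 0) : Nat) : Int) with hc0
  set c1 := (resList l).count 1 with hc1
  set c2 := (resList l).count 2 with hc2
  simp only [List.length_append, List.length_replicate]
  have := pairLoop_spec c1 c2 (0 + c0)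
  push_cast at this ⊢
  rw [this]
  rw [hc1, hc2, count_resList_one, count_resList_two]
  set a1 : Int := ((l.countP (fun x => PySem.Int.mod x 3 == 1) : Nat) : Int) with ha1
  set a2 : Int := ((l.countP (fun x => PySem.Int.mod x 3 == 2) : Nat) : Int) with ha2
  have h1 : (0 : Int) ≤ a1 := by rw [ha1]; positivity
  have h2 : (0 : Int) ≤ a2 := by rw [ha2]; positivity
  have habs : |a1 - a2| = a1 + a2 - 2 * min a1 a2 := by
    rcases abs_cases (a1 - a2) with ⟨h, h'⟩ | ⟨h, h'⟩ <;> omega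
  simp only [zero_add]
  rw [habs]
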